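-- pv_equiv track=rewrite | github.com/vinhq-huynh/ngram-language-model | ngram_skeleton.py | ngrams
-- ===== SOURCE A (Python) =====
-- def start_pad(n):
--     """ Returns a padding string of length n to append to the front of text
--     as a pre-processing step to building n-grams """
--     return '~' * n
--
-- def ngrams(n, text):
--     """ Returns the ngrams of the text as tuples where the first element is
--         the length-n context and the second is the character """
--     # Initialize an empty list to store the ngrams
--     ngrams = []
--     text = start_pad(n) + text
--
--     # Loop through the text starting from the nth character
--     for i in range(n, len(text)):
--         # Find the context, which is the n characters before the i (current) character
--         context = text[i - n:i]
--         # The current character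
--         char = text[i]
--         # Append the ngram to the list
--         ngrams.append((context, char))
--
--     return ngrams
-- ===== SOURCE B (Python) =====
-- def ngrams(n, text):
--     """ Returns the ngrams of the text as tuples where the first element is
--         the length-n context and the second is the character """
--     context = '~' * n
--     result = []
--     for char in text:
--         result.append((context, char))
--         context = (context + char)[1:]
--     return result
-- ===== Notes on version B (the rewrite author's own statement) =====
-- stated objective: alternative
-- what changed: Replaces the pad-then-index-and-reslice loop over range(n, len(padded)) with a rolling context window updated incrementally as (context + char)[1:] while iterating directly over the characters of text.
-- outside the precondition, e.g. on ngrams(-1, 'ab'): A returns [('a', 'b'), ('', 'a'), ('', 'b')], B returns [('', 'a'), ('', 'b')]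
import Mathlib
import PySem

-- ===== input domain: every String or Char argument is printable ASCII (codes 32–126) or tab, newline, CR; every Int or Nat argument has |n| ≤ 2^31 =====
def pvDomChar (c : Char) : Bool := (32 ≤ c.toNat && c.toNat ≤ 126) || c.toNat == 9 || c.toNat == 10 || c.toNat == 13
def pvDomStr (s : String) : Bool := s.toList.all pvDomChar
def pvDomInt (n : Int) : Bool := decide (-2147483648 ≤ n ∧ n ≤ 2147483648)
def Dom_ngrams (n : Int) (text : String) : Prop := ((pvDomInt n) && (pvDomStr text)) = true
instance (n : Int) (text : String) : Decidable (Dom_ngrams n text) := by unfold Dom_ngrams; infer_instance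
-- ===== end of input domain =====

-- B replaces A's pad-then-index-and-reslice loop by a rolling context window updated
-- incrementally while iterating directly over the characters of text (alternative decomposition).


-- ===== PORT A =====
-- padded = '~'*n + text; for i in range(n, len(padded)): append (padded[i-n:i], padded[i])
def ngrams (n : Int) (text : String) : List (String × String) :=
  let padded : List Char := List.replicate n.toNat '~' ++ text.toList
  (PySem.List.pyRange n (PySem.List.len padded) 1).foldl
    (fun acc i =>
      acc ++ [(String.ofList (PySem.List.slice padded (some (i - n)) (some i)),
               String.ofList [PySem.List.pyGetD padded i ' '])]) []

-- ===== PORT B =====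
-- rolling window: for char in text: append (context, char); context = (context + char)[1:]
def ngramsAltGo (ctx : List Char) (cs : List Char) (acc : List (String × String)) :
    List (String × String) :=
  match cs with
  | [] => acc
  | c :: rest =>
      ngramsAltGo (PySem.List.slice (ctx ++ [c]) (some 1) none) rest
        (acc ++ [(String.ofList ctx, String.ofList [c])])

def ngrams_alt (n : Int) (text : String) : List (String × String) :=
  ngramsAltGo (List.replicate n.toNat '~') text.toList []

-- ===== PRECONDITION & SPEC =====
-- Pre_ restricts to the natural domain n ≥ 0: for negative n A still returns, but its value
-- (an empty pad plus a negative-start index range, yielding a spurious leading tuple) is an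
-- artefact outside the function's purpose, and B's rolling window does the natural thing there.
def Pre_ngrams (n : Int) (text : String) : Prop := 0 ≤ n
instance (n : Int) (text : String) : Decidable (Pre_ngrams n text) := by unfold Pre_ngrams; infer_instance
def pvWitness_ngrams : Int × String := (2, "ab")

def Spec_ngrams (n : Int) (text : String) (out : List (String × String)) : Prop := out = ngrams_alt n text
instance (n : Int) (text : String) (out : List (String × String)) : Decidable (Spec_ngrams n text out) := by unfold Spec_ngrams; infer_instance

-- ===== CLAIM (what is proved, stated in full; the proofs are below) =====
def Claim_equal_ngrams : Prop := ∀ (n : Int) (text : String), Dom_ngrams n text → Pre_ngrams n text → Spec_ngrams n text (ngrams n text)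

-- ===== LEMMAS AND PROOFS =====

-- shifting the rolling window one step: tail of (ctx ++ c :: cs) splits off the new context
lemma tail_append_cons {α : Type} (ctx cs : List α) (c : α) :
    (ctx ++ c :: cs).tail = (ctx ++ [c]).tail ++ cs := by
  cases ctx <;> simp

-- A's indexed loop from position s computes exactly B's rolling-window recursion
lemma loop_eq (n : Int) (hn : 0 ≤ n) (padded : List Char) :
    ∀ (cs ctx : List Char) (s : Nat) (acc : List (String × String)),
      ctx.length = n.toNat →
      padded.length = s + cs.length →
      n.toNat ≤ s →
      padded.drop (s - n.toNat) = ctx ++ cs →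
      (PySem.List.pyRange (s : Int) (padded.length : Int) 1).foldl
        (fun acc i =>
          acc ++ [(String.ofList (PySem.List.slice padded (some (i - n)) (some i)),
                   String.ofList [PySem.List.pyGetD padded i ' '])]) acc
      = ngramsAltGo ctx cs acc := by
  intro cs
  induction cs with
  | nil =>
      intro ctx s acc _ hlen _ _
      have h0 : padded.length = s := by simpa using hlen
      rw [PySem.List.pyRange_one_eq_nil (by omega : (padded.length : Int) ≤ (s : Int))]
      rfl
  | cons c rest ih =>
      intro ctx s acc hctx hlen hns hdrop
      have hlen' : padded.length = s + rest.length + 1 := by simpa using hlen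
      rw [PySem.List.pyRange_one_cons (by omega : (s : Int) < (padded.length : Int))]
      rw [List.foldl_cons]
      have hslice : PySem.List.slice padded (some ((s : Int) - n)) (some (s : Int)) = ctx := by
        have h1 : (s : Int) - n = ((s - n.toNat : Nat) : Int) := by omega
        rw [h1, PySem.List.slice_natCast, hdrop]
        have h2 : s - (s - n.toNat) = n.toNat := by omega
        rw [h2, ← hctx, List.take_left]
      have hget : PySem.List.pyGetD padded (s : Int) ' ' = c := by
        have h5 : ((ctx ++ c :: rest) : List Char)[ctx.length]? = some c := by simp
        rw [← hdrop, List.getElem?_drop] at h5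
        have h6 : s - n.toNat + ctx.length = s := by omega
        rw [h6] at h5
        rw [PySem.List.pyGetD_natCast]
        simp [List.getD, h5]
      rw [hslice, hget]
      have hstep : (((s : Int)) + 1) = ((s + 1 : Nat) : Int) := by push_cast; ring
      rw [hstep]
      rw [ngramsAltGo]
      apply ih
      · simp [PySem.List.slice_from_one]; omega
      · omega
      · omega
      · rw [PySem.List.slice_from_one]
        have h7 : s + 1 - n.toNat = (s - n.toNat) + 1 := by omega
        rw [h7, ← List.drop_drop, hdrop]
        simpa using tail_append_cons ctx rest c

-- ===== VERDICT (by name: the statement is the Claim_ definition above) =====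
theorem ngrams_spec : Claim_equal_ngrams := by
  intro n text _ hpre
  have hpre' : 0 ≤ n := hpre
  unfold Spec_ngrams ngrams ngrams_alt
  simp only [PySem.List.len_eq]
  have hn0 : n = ((n.toNat : Nat) : Int) := by omega
  rw [hn0]
  refine loop_eq ((n.toNat : Nat) : Int) (by simp)
    (List.replicate n.toNat '~' ++ text.toList) text.toList
    (List.replicate n.toNat '~') n.toNat [] ?_ ?_ ?_ ?_
  · simp; omega
  · simp
  · simp
  · simp
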